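-- pv_equiv track=rewrite | github.com/ORBlTAL/Algorithm | algorithm_0821/baby_gin.py | baby_gin_comb
-- ===== SOURCE A (Python) =====
-- from itertools import combinations
--
-- def run(card):
--     return card[0] + 2 == card[1] + 1 == card[2] # run 조건이 참일 때 리턴
--
-- def triplet(card):
--     return card[0] == card[1] == card[2] # triplet 조건이 참일 때 리턴
--
-- def baby_gin_comb(card):
--     for group in combinations(range(6),3): # 6개 중에서 3개를 뽑아 조합으로
--         g1 = []
--         for idx in group: # 위에서 뽑은 조합 요소를 토대로 g1 리스트에 3개씩 저장
--             g1.append(card[idx])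
--
--         g2 = []
--         for i in range(6): # 위의 그룹에 속하지 않는 카드들끼리 뽑아서 g2 리스트에 저장
--             if i not in group:
--                 g2.append(card[i])
--
--         ok1 = run(g1) or triplet(g1) # g1이 run 또는 triplet일 떄
--         ok2 = run(g2) or triplet(g2) # g2가 run 또는 tripelt 일 때
--         if ok1 and ok2: # 둘 다 둘 중 하나는 충족하고 있어야 만족한다.
--             return True
--     return False
-- ===== SOURCE B (Python) =====
-- from itertools import combinations
--
-- def baby_gin_comb(card):
--     # phase 1: table of all index-triples whose cards (in index order) form a run or triplet
--     valid = set()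
--     for group in combinations(range(6), 3):
--         g = [card[i] for i in group]
--         if g[0] + 2 == g[1] + 1 == g[2] or g[0] == g[1] == g[2]:
--             valid.add(group)
--     # phase 2: does any valid triple have a valid complementary triple?
--     for group in valid:
--         comp = tuple(i for i in range(6) if i not in group)
--         if comp in valid:
--             return True
--     return False
-- ===== Notes on version B (the rewrite author's own statement) =====
-- stated objective: alternative
-- what changed: B separates the work into two phases: it first builds a set of all valid index-triples (one run/triplet test per 3-subset), then checks whether any valid triple's complement is also in the set, instead of A's single loop that re-extracts and re-tests both groups in every iteration.
import Mathlib
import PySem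

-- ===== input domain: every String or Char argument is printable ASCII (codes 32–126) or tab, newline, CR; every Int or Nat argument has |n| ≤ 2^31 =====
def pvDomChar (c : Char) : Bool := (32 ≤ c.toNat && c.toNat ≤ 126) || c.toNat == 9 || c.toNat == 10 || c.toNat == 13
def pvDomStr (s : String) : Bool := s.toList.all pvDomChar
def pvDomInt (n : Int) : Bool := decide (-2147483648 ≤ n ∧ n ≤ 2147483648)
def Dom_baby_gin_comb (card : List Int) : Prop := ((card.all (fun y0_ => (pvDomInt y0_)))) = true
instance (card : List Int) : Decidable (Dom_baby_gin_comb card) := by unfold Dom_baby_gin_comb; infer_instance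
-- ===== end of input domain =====

-- B is an alternative decomposition of A (build the table of valid triples, then look up complements);
-- the proof is about the return value only; same cost class, no speed claim.

-- ===== PORT A =====
-- itertools.combinations(range(6), 3): increasing index triples in lexicographic order
def pvCombs : List (List Nat) :=
  ((List.range 6).flatMap fun i =>
    (List.range 6).flatMap fun j =>
      (List.range 6).map fun k => [i, j, k]).filter
    (fun g => match g with
      | [i, j, k] => decide (i < j) && decide (j < k)
      | _ => false)

-- complement indices: [i for i in range(6) if i not in group]
def pvComp (group : List Nat) : List Nat :=
  (List.range 6).filter (fun i => !(group.contains i))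

def pyRun (g : List Int) : Bool :=
  (g.getD 0 0 + 2 == g.getD 1 0 + 1) && (g.getD 1 0 + 1 == g.getD 2 0)

def pyTriplet (g : List Int) : Bool :=
  (g.getD 0 0 == g.getD 1 0) && (g.getD 1 0 == g.getD 2 0)

-- card[idx] is ported as getD (total): Pre_ guarantees all indices 0..5 are in range.
def baby_gin_comb (card : List Int) : Bool :=
  pvCombs.any fun group =>
    let g1 := group.map (fun idx => card.getD idx 0)
    let g2 := (pvComp group).map (fun i => card.getD i 0)
    let ok1 := pyRun g1 || pyTriplet g1
    let ok2 := pyRun g2 || pyTriplet g2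
    ok1 && ok2

-- ===== PORT B =====
-- phase 1: the set of all valid index-triples (condition inlined, as in Source B)
def pvValid (card : List Int) : PySem.Set (List Nat) :=
  pvCombs.foldl (fun s group =>
    let g := group.map (fun i => card.getD i 0)
    if (g.getD 0 0 + 2 == g.getD 1 0 + 1 && g.getD 1 0 + 1 == g.getD 2 0)
        || (g.getD 0 0 == g.getD 1 0 && g.getD 1 0 == g.getD 2 0)
    then PySem.Set.add s group else s) PySem.Set.empty

-- phase 2: some valid triple whose complement is also in the set (order-independent consumption)
def baby_gin_comb_alt (card : List Int) : Bool :=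
  (pvValid card).any fun group => PySem.Set.contains (pvValid card) (pvComp group)

-- ===== PRECONDITION & SPEC =====
-- A indexes card[0..5] and raises IndexError on lists shorter than 6; exactly those inputs are excluded.
def Pre_baby_gin_comb (card : List Int) : Prop := 6 ≤ card.length
instance (card : List Int) : Decidable (Pre_baby_gin_comb card) := by unfold Pre_baby_gin_comb; infer_instance
def pvWitness_baby_gin_comb : List Int := [1, 2, 3, 5, 5, 5]

def Spec_baby_gin_comb (card : List Int) (out : Bool) : Prop := out = baby_gin_comb_alt card
instance (card : List Int) (out : Bool) : Decidable (Spec_baby_gin_comb card out) := by unfold Spec_baby_gin_comb; infer_instance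

-- ===== CLAIM (what is proved, stated in full; the proofs are below) =====
def Claim_equal_baby_gin_comb : Prop := ∀ (card : List Int), Dom_baby_gin_comb card → Pre_baby_gin_comb card → Spec_baby_gin_comb card (baby_gin_comb card)

-- ===== LEMMAS AND PROOFS =====

-- the per-group test both ports run (A via pyRun/pyTriplet, B inline — definitionally the same boolean)
def pvCond (card : List Int) (group : List Nat) : Bool :=
  let g := group.map (fun i => card.getD i 0)
  pyRun g || pyTriplet g

lemma mem_foldl_valid (card : List Int) (l : List (List Nat)) (s : PySem.Set (List Nat)) (x : List Nat) :
    x ∈ l.foldl (fun s group => if pvCond card group then PySem.Set.add s group else s) s ↔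
      x ∈ s ∨ (x ∈ l ∧ pvCond card x = true) := by
  induction l generalizing s with
  | nil => simp
  | cons h t ih =>
    simp only [List.foldl_cons, ih, List.mem_cons]
    by_cases hc : pvCond card h
    · simp [hc, PySem.Set.mem_add]
      constructor
      · rintro ((hs | rfl) | ⟨ht, hx⟩)
        · exact Or.inl hs
        · exact Or.inr ⟨Or.inl rfl, hc⟩
        · exact Or.inr ⟨Or.inr ht, hx⟩
      · rintro (hs | ⟨(rfl | ht), hx⟩)
        · exact Or.inl (Or.inl hs)
        · exact Or.inl (Or.inr rfl)
        · exact Or.inr ⟨ht, hx⟩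
    · simp [hc]
      constructor
      · rintro (hs | ⟨ht, hx⟩)
        · exact Or.inl hs
        · exact Or.inr ⟨Or.inr ht, hx⟩
      · rintro (hs | ⟨(rfl | ht), hx⟩)
        · exact Or.inl hs
        · exact absurd hx hc
        · exact Or.inr ⟨ht, hx⟩

lemma mem_valid (card : List Int) (x : List Nat) :
    x ∈ pvValid card ↔ x ∈ pvCombs ∧ pvCond card x = true := by
  have h : pvValid card = pvCombs.foldl
      (fun s group => if pvCond card group then PySem.Set.add s group else s)
      PySem.Set.empty := rfl
  rw [h]
  simpa [PySem.Set.empty] using mem_foldl_valid card pvCombs PySem.Set.empty x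

lemma comp_mem_combs : ∀ g ∈ pvCombs, pvComp g ∈ pvCombs := by decide

theorem baby_gin_comb_spec : Claim_equal_baby_gin_comb := by
  intro card _ _
  unfold Spec_baby_gin_comb
  have hA : baby_gin_comb card = pvCombs.any
      (fun group => pvCond card group && pvCond card (pvComp group)) := rfl
  rw [hA, baby_gin_comb_alt]
  rcases hB : (pvValid card).any
      (fun group => PySem.Set.contains (pvValid card) (pvComp group)) with _ | _
  · -- B = false: no combo satisfies both conditions
    rw [List.any_eq_false] at hB ⊢
    intro g hg
    simp only [Bool.and_eq_true, not_and]
    intro h1 h2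
    have hgv : g ∈ pvValid card := (mem_valid card g).mpr ⟨hg, h1⟩
    have hcv : pvComp g ∈ pvValid card :=
      (mem_valid card (pvComp g)).mpr ⟨comp_mem_combs g hg, h2⟩
    exact hB g hgv (by simpa [PySem.Set.contains_iff] using hcv)
  · -- B = true: some valid combo has a valid complement
    rw [List.any_eq_true] at hB ⊢
    obtain ⟨g, hgv, hcv⟩ := hB
    have h1 := (mem_valid card g).mp hgv
    have h2 := (mem_valid card (pvComp g)).mp
      (by simpa [PySem.Set.contains_iff] using hcv)
    exact ⟨g, h1.1, by simp [h1.2, h2.2]⟩
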